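-- pv_equiv track=rewrite | github.com/monhacks/crystalboard | tools/text.py | process_word
-- ===== SOURCE A (Python) =====
-- MAX_LINE_LENGTH = 18
--
-- CHARMAP_LENGTH = {
--       "'d": 1,
--       "'l": 1,
--       "'m": 1,
--       "'r": 1,
--       "'s": 1,
--       "'t": 1,
--       "'v": 1,
--       "#": 4,
--       "<PLAYER>": 7,
-- }
--
-- def process_word(word):
--     """
--     Return the length of a given word accounting for pokecrystal charmap and count an additional space character after the word.
--     """
--     length = len(word)
--     for char, charlen in CHARMAP_LENGTH.items():
--         length += (charlen - len(char)) * word.count(char)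
--     if length > MAX_LINE_LENGTH:
--         exc = f"Found a word too long to split (above {MAX_LINE_LENGTH} characters)."
--         raise Exception(exc)
--     return length + 1
-- ===== SOURCE B (Python) =====
-- MAX_LINE_LENGTH = 18
--
-- def process_word(word):
--     """
--     Return the length of a given word accounting for pokecrystal charmap and count an additional space character after the word.
--     """
--     length = 0
--     i = 0
--     n = len(word)
--     while i < n:
--         if word[i:i+8] == '<PLAYER>':
--             length += 7
--             i += 8
--         elif word[i] == "'" and i + 1 < n and word[i+1] in "dlmrstv":
--             length += 1
--             i += 2
--         elif word[i] == '#':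
--             length += 4
--             i += 1
--         else:
--             length += 1
--             i += 1
--     if length > MAX_LINE_LENGTH:
--         exc = f"Found a word too long to split (above {MAX_LINE_LENGTH} characters)."
--         raise Exception(exc)
--     return length + 1
-- ===== Notes on version B (the rewrite author's own statement) =====
-- stated objective: alternative
-- what changed: Replaces A's nine independent str.count passes (one per charmap token) by a single greedy left-to-right scan that tries the 8-char token, then apostrophe pairs, then the hash token at each position and advances past each match once.
import Mathlib
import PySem

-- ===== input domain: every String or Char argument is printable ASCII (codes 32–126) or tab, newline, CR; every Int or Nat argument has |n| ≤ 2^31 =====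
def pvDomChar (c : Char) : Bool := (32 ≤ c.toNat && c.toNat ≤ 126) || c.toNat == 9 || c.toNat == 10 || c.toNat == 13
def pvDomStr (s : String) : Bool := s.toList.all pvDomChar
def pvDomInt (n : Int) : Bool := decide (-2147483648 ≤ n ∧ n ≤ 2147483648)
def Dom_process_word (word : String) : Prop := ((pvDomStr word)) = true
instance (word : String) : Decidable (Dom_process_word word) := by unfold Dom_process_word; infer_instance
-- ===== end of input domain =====

-- B replaces A's nine independent word.count passes by ONE greedy left-to-right scan
-- (alternative decomposition; the raise condition and return value are unchanged).
-- A's 'raise' branch (adjusted length > 18) is excluded by Pre_process_word below.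

-- ===== PORT A =====
def CHARMAP_LENGTH : List (String × Int) :=
  [("'d", 1), ("'l", 1), ("'m", 1), ("'r", 1), ("'s", 1), ("'t", 1), ("'v", 1),
   ("#", 4), ("<PLAYER>", 7)]

def process_word (word : String) : Int :=
  let length : Int := (PySem.Str.len word : Int)
  let length := CHARMAP_LENGTH.foldl
    (fun acc cv => acc + (cv.2 - (PySem.Str.len cv.1 : Int)) * (PySem.Str.count word cv.1 : Int))
    length
  -- 'if length > MAX_LINE_LENGTH: raise' is excluded by Pre_process_word
  length + 1

-- ===== PORT B =====
-- one greedy pass; mirrors Source B's while loop (word[i:i+8] slice test first, then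
-- apostrophe pair, then '#', else one plain character)
def scanLen : List Char → Int
  | [] => 0
  | c :: t =>
    if (['<','P','L','A','Y','E','R','>'] : List Char).isPrefixOf (c :: t) then
      7 + scanLen (t.drop 7)
    else if c = '\'' then
      match t with
      | c2 :: r =>
        if c2 ∈ (['d','l','m','r','s','t','v'] : List Char) then 1 + scanLen r
        else 1 + scanLen (c2 :: r)
      | [] => 1
    else if c = '#' then 4 + scanLen t
    else 1 + scanLen t
  termination_by l => l.length
  decreasing_by all_goals (simp; try omega)

def process_word_alt (word : String) : Int :=
  -- 'if length > MAX_LINE_LENGTH: raise' is excluded by Pre_process_word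
  scanLen word.toList + 1

-- ===== PRECONDITION & SPEC =====
-- Pre_ excludes exactly the inputs on which A raises its too-long exception:
-- those whose charmap-adjusted length exceeds MAX_LINE_LENGTH = 18.
def Pre_process_word (word : String) : Prop :=
  (PySem.Str.len word : Int)
    - (PySem.Str.count word "'d" : Int) - (PySem.Str.count word "'l" : Int)
    - (PySem.Str.count word "'m" : Int) - (PySem.Str.count word "'r" : Int)
    - (PySem.Str.count word "'s" : Int) - (PySem.Str.count word "'t" : Int)
    - (PySem.Str.count word "'v" : Int)
    + 3 * (PySem.Str.count word "#" : Int)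
    - (PySem.Str.count word "<PLAYER>" : Int) ≤ 18

instance (word : String) : Decidable (Pre_process_word word) := by
  unfold Pre_process_word; infer_instance

def pvWitness_process_word : String := "hello"

def Spec_process_word (word : String) (out : Int) : Prop := out = process_word_alt word
instance (word : String) (out : Int) : Decidable (Spec_process_word word out) := by
  unfold Spec_process_word; infer_instance

-- ===== CLAIM (what is proved, stated in full; the proofs are below) =====
def Claim_equal_process_word : Prop := ∀ (word : String), Dom_process_word word → Pre_process_word word → Spec_process_word word (process_word word)

-- ===== LEMMAS AND PROOFS =====

-- number of non-overlapping occurrences of `sub` in `l`, scanning left to right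
-- (the quantity str.count computes), fuel-free
def occCount (sub : List Char) : List Char → Nat
  | [] => 0
  | c :: t =>
    if sub.isPrefixOf (c :: t) then occCount sub (t.drop (sub.length - 1)) + 1
    else occCount sub t
  termination_by l => l.length
  decreasing_by all_goals (simp; try omega)

theorem go_spec (sub : List Char) (hs : sub ≠ []) :
    ∀ fuel (l : List Char) (acc : Nat), l.length ≤ fuel →
      PySem.Chars.count.go sub fuel l acc = acc + occCount sub l := by
  intro fuel
  induction fuel with
  | zero =>
    intro l acc hl
    have : l = [] := List.eq_nil_of_length_eq_zero (by omega)
    subst this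
    simp [PySem.Chars.count.go, occCount]
  | succ n ih =>
    intro l acc hl
    match l with
    | [] => simp [PySem.Chars.count.go, occCount]
    | c :: t =>
      rw [PySem.Chars.count.go]
      by_cases h : sub.isPrefixOf (c :: t) = true
      · rw [if_pos h]
        have hdrop : (c :: t).drop sub.length = t.drop (sub.length - 1) := by
          match sub, hs with
          | s₀ :: st, _ => simp
        rw [hdrop, ih _ _ (by
          simp at hl ⊢
          have := List.length_drop (l := t) (i := sub.length - 1); omega)]
        rw [occCount, if_pos h]
        omega
      · rw [if_neg h, ih _ _ (by simp at hl; omega), occCount, if_neg h]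

theorem count_eq_occ (l sub : List Char) (hs : sub ≠ []) :
    PySem.Chars.count l sub = occCount sub l := by
  rw [PySem.Chars.count, if_neg (by simp [hs]), go_spec sub hs l.length l 0 le_rfl]
  omega

theorem occ_step {p : List Char} {c : Char} {t : List Char}
    (h : p.isPrefixOf (c :: t) = false) : occCount p (c :: t) = occCount p t := by
  rw [occCount, if_neg (by simp [h])]

-- A's count-based total, on the char list
def countTotal (l : List Char) : Int :=
  (l.length : Int)
    - (occCount ['\'','d'] l : Int) - (occCount ['\'','l'] l : Int)
    - (occCount ['\'','m'] l : Int) - (occCount ['\'','r'] l : Int)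
    - (occCount ['\'','s'] l : Int) - (occCount ['\'','t'] l : Int)
    - (occCount ['\'','v'] l : Int)
    + 3 * (occCount ['#'] l : Int)
    - (occCount ['<','P','L','A','Y','E','R','>'] l : Int)

theorem occ_hit {p : List Char} {c : Char} {t : List Char}
    (h : p.isPrefixOf (c :: t) = true) :
    occCount p (c :: t) = occCount p (t.drop (p.length - 1)) + 1 := by
  rw [occCount, if_pos (by simp [h])]

theorem prefix_false_of_ne {x c : Char} (p : List Char) (t : List Char) (h : x ≠ c) :
    (x :: p).isPrefixOf (c :: t) = false := by
  simp [List.isPrefixOf, h]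

theorem prefix2_false {x c2 : Char} (r : List Char) (h : x ≠ c2) :
    (['\'', x]).isPrefixOf ('\'' :: c2 :: r) = false := by
  simp [List.isPrefixOf, h]

theorem scanLen_eq_countTotal : ∀ (n : Nat) (l : List Char), l.length ≤ n →
    scanLen l = countTotal l := by
  intro n
  induction n with
  | zero =>
    intro l hl
    have : l = [] := List.eq_nil_of_length_eq_zero (by omega)
    subst this
    simp [scanLen, countTotal, occCount]
  | succ n ih =>
    intro l hl
    match l with
    | [] => simp [scanLen, countTotal, occCount]
    | c :: t =>
      rw [scanLen.eq_def]
      simp only []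
      by_cases hP : (['<','P','L','A','Y','E','R','>'] : List Char).isPrefixOf (c :: t) = true
      · obtain ⟨rest, hrest⟩ := List.isPrefixOf_iff_prefix.mp hP
        obtain ⟨rfl, rfl⟩ : c = '<' ∧ t = 'P'::'L'::'A'::'Y'::'E'::'R'::'>'::rest := by
          simpa using hrest.symm
        simp only [if_pos hP, List.drop_succ_cons, List.drop_zero]
        rw [ih rest (by simp at hl ⊢; omega)]
        simp [countTotal, occCount, List.isPrefixOf]
        omega
      · simp only [if_neg hP]
        by_cases hq : c = '\''
        · subst hq
          rw [if_pos rfl]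
          match t with
          | [] => simp [countTotal, occCount, List.isPrefixOf]
          | c2 :: r =>
            simp only []
            by_cases hm : c2 ∈ (['d','l','m','r','s','t','v'] : List Char)
            · rw [if_pos hm, ih r (by simp at hl ⊢; omega)]
              simp only [List.mem_cons, List.not_mem_nil, or_false] at hm
              rcases hm with rfl | rfl | rfl | rfl | rfl | rfl | rfl <;>
                (simp [countTotal, occCount, List.isPrefixOf]; omega)
            · rw [if_neg hm, ih (c2 :: r) (by simp at hl ⊢; omega)]
              simp only [List.mem_cons, List.not_mem_nil, or_false, not_or] at hm
              obtain ⟨h1, h2, h3, h4, h5, h6, h7⟩ := hm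
              rw [countTotal, countTotal,
                occ_step (prefix2_false _ (Ne.symm h1)),
                occ_step (prefix2_false _ (Ne.symm h2)),
                occ_step (prefix2_false _ (Ne.symm h3)),
                occ_step (prefix2_false _ (Ne.symm h4)),
                occ_step (prefix2_false _ (Ne.symm h5)),
                occ_step (prefix2_false _ (Ne.symm h6)),
                occ_step (prefix2_false _ (Ne.symm h7)),
                occ_step (p := ['#']) (prefix_false_of_ne (x := '#') (c := '\'') _ _ (by decide)),
                occ_step (p := ['<','P','L','A','Y','E','R','>']) (prefix_false_of_ne (x := '<') (c := '\'') _ _ (by decide))]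
              simp only [List.length_cons]
              push_cast
              omega
        · by_cases hh : c = '#'
          · subst hh
            rw [if_neg hq, if_pos rfl, ih t (by simp at hl ⊢; omega)]
            rw [countTotal, countTotal,
              occ_step (prefix_false_of_ne _ _ (by decide)),
              occ_step (prefix_false_of_ne _ _ (by decide)),
              occ_step (prefix_false_of_ne _ _ (by decide)),
              occ_step (prefix_false_of_ne _ _ (by decide)),
              occ_step (prefix_false_of_ne _ _ (by decide)),
              occ_step (prefix_false_of_ne _ _ (by decide)),
              occ_step (prefix_false_of_ne _ _ (by decide)),
              occ_hit (p := ['#']) (by simp [List.isPrefixOf]),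
              occ_step (prefix_false_of_ne _ _ (by decide))]
            simp only [List.length_cons, List.length_nil, Nat.add_sub_cancel, List.drop_zero]
            push_cast
            omega
          · rw [if_neg hq, if_neg hh, ih t (by simp at hl ⊢; omega)]
            have hP' : (['<','P','L','A','Y','E','R','>'] : List Char).isPrefixOf (c :: t) = false :=
              Bool.eq_false_iff.mpr hP
            rw [countTotal, countTotal,
              occ_step (prefix_false_of_ne _ _ (fun h => hq h.symm)),
              occ_step (prefix_false_of_ne _ _ (fun h => hq h.symm)),
              occ_step (prefix_false_of_ne _ _ (fun h => hq h.symm)),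
              occ_step (prefix_false_of_ne _ _ (fun h => hq h.symm)),
              occ_step (prefix_false_of_ne _ _ (fun h => hq h.symm)),
              occ_step (prefix_false_of_ne _ _ (fun h => hq h.symm)),
              occ_step (prefix_false_of_ne _ _ (fun h => hq h.symm)),
              occ_step (prefix_false_of_ne _ _ (fun h => hh h.symm)),
              occ_step hP']
            simp only [List.length_cons]
            push_cast
            omega

-- ===== VERDICT (by name: the statement is the Claim_ definition above) =====
theorem process_word_spec : Claim_equal_process_word := by
  intro word _ _
  unfold Spec_process_word process_word process_word_alt CHARMAP_LENGTH
  simp only [List.foldl_cons, List.foldl_nil]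
  have hcnt : ∀ (p : String), p.toList ≠ [] →
      (PySem.Str.count word p : Nat) = occCount p.toList word.toList := by
    intro p hp
    simp [PySem.Str.count, count_eq_occ _ _ hp]
  rw [scanLen_eq_countTotal word.toList.length word.toList le_rfl]
  rw [hcnt "'d" (by decide), hcnt "'l" (by decide), hcnt "'m" (by decide),
      hcnt "'r" (by decide), hcnt "'s" (by decide), hcnt "'t" (by decide),
      hcnt "'v" (by decide), hcnt "#" (by decide), hcnt "<PLAYER>" (by decide),
      PySem.Str.len_eq]
  unfold countTotal
  have e1 : ("'d" : String).toList = ['\'','d'] := by decide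
  have e2 : ("'l" : String).toList = ['\'','l'] := by decide
  have e3 : ("'m" : String).toList = ['\'','m'] := by decide
  have e4 : ("'r" : String).toList = ['\'','r'] := by decide
  have e5 : ("'s" : String).toList = ['\'','s'] := by decide
  have e6 : ("'t" : String).toList = ['\'','t'] := by decide
  have e7 : ("'v" : String).toList = ['\'','v'] := by decide
  have e8 : ("#" : String).toList = ['#'] := by decide
  have e9 : ("<PLAYER>" : String).toList = ['<','P','L','A','Y','E','R','>'] := by decide
  rw [e1, e2, e3, e4, e5, e6, e7, e8, e9]
  have l1 : PySem.Str.len "'d" = 2 := by decide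
  have l2 : PySem.Str.len "'l" = 2 := by decide
  have l3 : PySem.Str.len "'m" = 2 := by decide
  have l4 : PySem.Str.len "'r" = 2 := by decide
  have l5 : PySem.Str.len "'s" = 2 := by decide
  have l6 : PySem.Str.len "'t" = 2 := by decide
  have l7 : PySem.Str.len "'v" = 2 := by decide
  have l8 : PySem.Str.len "#" = 1 := by decide
  have l9 : PySem.Str.len "<PLAYER>" = 8 := by decide
  rw [l1, l2, l3, l4, l5, l6, l7, l8, l9]
  push_cast
  ring_nf
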